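-- pv_equiv track=rewrite | github.com/mranawee/Complementary-sequence | compSeq.py | compSeq
-- ===== SOURCE A (Python) =====
-- def compSeq(DNA_seq, direction = 'same'):
--     comp_dict = {'A':'T', 'T':'A', 'G':'C', 'C':'G'} #dictionary declaration
--     comp = '' #declaring output originally as an empty string
--     DNA_seq = DNA_seq.upper() #to take care of lowercase letters in input
--
--     #everything in the if statement is executed with the direction argument specified as 'reverse'
--     if direction == 'reverse':
--         for nuc in DNA_seq[::-1]: #iteration in reverse order
--             if nuc in comp_dict: #in case there are characters that are not actually DNA nucleotides
--                 comp += comp_dict[nuc]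
--     else:
--         for nuc in DNA_seq:
--             if nuc in comp_dict:
--                 comp += comp_dict[nuc]
--
--     return comp
-- ===== SOURCE B (Python) =====
-- def compSeq(DNA_seq, direction = 'same'):
--     # delete every input character that is not a nucleotide letter (either case)
--     delete = ''.join(c for c in DNA_seq if c not in 'ATGCatgc')
--     # one translation table: complement both cases directly (folds in the uppercasing)
--     table = str.maketrans('ATGCatgc', 'TACGTACG', delete)
--     out = DNA_seq.translate(table)
--     return out[::-1] if direction == 'reverse' else out
-- ===== Notes on version B (the rewrite author's own statement) =====
-- stated objective: alternative
-- what changed: B builds a str.maketrans translation table from the input (nucleotides of either case mapped to their complement directly, all other input characters marked for deletion) and does one translate() call plus a single final [::-1] slice, instead of A's uppercase pass followed by two duplicated membership-test append loops.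
import Mathlib
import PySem

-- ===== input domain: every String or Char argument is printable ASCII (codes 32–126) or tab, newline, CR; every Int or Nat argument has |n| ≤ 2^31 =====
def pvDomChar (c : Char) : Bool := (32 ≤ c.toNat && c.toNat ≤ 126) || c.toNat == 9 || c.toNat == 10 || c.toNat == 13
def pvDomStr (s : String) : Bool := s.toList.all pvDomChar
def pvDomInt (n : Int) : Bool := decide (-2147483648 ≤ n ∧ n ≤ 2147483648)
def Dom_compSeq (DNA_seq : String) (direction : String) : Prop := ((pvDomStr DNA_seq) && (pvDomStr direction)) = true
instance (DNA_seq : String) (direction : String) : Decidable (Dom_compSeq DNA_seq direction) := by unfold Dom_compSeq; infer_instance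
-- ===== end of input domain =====

-- B replaces A's uppercase pass + two duplicated append loops by one maketrans-style
-- translation table built from the input (both cases complemented directly, non-nucleotide
-- input characters deleted), one translate pass, and a single final [::-1] slice.


-- ===== PORT A =====
-- A's dict {'A':'T','T':'A','G':'C','C':'G'}
def compDict : PySem.Dict Char Char :=
  PySem.Dict.ofList [('A', 'T'), ('T', 'A'), ('G', 'C'), ('C', 'G')]

-- the loop body 'if nuc in comp_dict: comp += comp_dict[nuc]' (membership + lookup
-- as one get?; the lookup cannot fail after the membership test)
def compSeqStep (comp : List Char) (nuc : Char) : List Char :=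
  match compDict.get? nuc with
  | some v => comp ++ [v]
  | none => comp

def compSeq (DNA_seq : String) (direction : String) : String :=
  let seq := PySem.Str.upper DNA_seq
  if direction == "reverse" then
    String.ofList (((PySem.Str.slice? seq none none (-1)).getD "").toList.foldl compSeqStep [])
  else
    String.ofList (seq.toList.foldl compSeqStep [])

-- ===== PORT B =====
-- the maketrans pair table for 'ATGCatgc' -> 'TACGTACG'
def transTable : PySem.Dict Char Char :=
  PySem.Dict.ofList (List.zip "ATGCatgc".toList "TACGTACG".toList)

-- str.translate applied by hand (PySem has no translate; exact step-for-step semantics: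
-- a char in the delete set is dropped, one with a table entry is replaced, others kept)
def translateB (deleteL : List Char) (cs : List Char) : List Char :=
  cs.filterMap (fun c =>
    if deleteL.contains c then none
    else
      match transTable.get? c with
      | some v => some v
      | none => some c)

def compSeq_alt (DNA_seq : String) (direction : String) : String :=
  let deleteL := DNA_seq.toList.filter (fun c => !("ATGCatgc".toList.contains c))
  let out := String.ofList (translateB deleteL DNA_seq.toList)
  if direction == "reverse" then (PySem.Str.slice? out none none (-1)).getD "" else out

-- ===== PRECONDITION & SPEC =====
def Spec_compSeq (DNA_seq : String) (direction : String) (out : String) : Prop := out = compSeq_alt DNA_seq direction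
instance (DNA_seq : String) (direction : String) (out : String) : Decidable (Spec_compSeq DNA_seq direction out) := by unfold Spec_compSeq; infer_instance

-- ===== CLAIM (what is proved, stated in full; the proofs are below) =====
def Claim_equal_compSeq : Prop := ∀ (DNA_seq : String) (direction : String), Dom_compSeq DNA_seq direction → Spec_compSeq DNA_seq direction (compSeq DNA_seq direction)

-- ===== LEMMAS AND PROOFS =====
-- A's append loop produces exactly the filterMap of the lookups
theorem foldl_compSeqStep (l : List Char) (acc : List Char) :
    l.foldl compSeqStep acc = acc ++ l.filterMap (fun c => compDict.get? c) := by
  induction l generalizing acc with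
  | nil => simp
  | cons c l ih =>
    rw [List.foldl_cons, List.filterMap_cons, ih]
    cases h : compDict.get? c <;> simp [compSeqStep, h]

-- (Char.ofNat n).toNat = n below the surrogate range (used to undo upperChar's arithmetic)
theorem toNat_ofNat_valid (n : Nat) (h : n < 55296) : (Char.ofNat n).toNat = n := by
  have hv : Nat.isValidChar n := Or.inl h
  simp [Char.ofNat, hv, Char.ofNatAux, Char.toNat, UInt32.toNat_ofNatLT]

-- PySem's upper is the character-wise upperChar map
theorem upper_eq_map (s : List Char) : PySem.Chars.upper s = s.map PySem.Chars.upperChar := by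
  simp [PySem.Chars.upper]

-- a character outside 'ATGCatgc' has no complement after uppercasing
theorem get?_upper_of_not_keep (c : Char) (h : "ATGCatgc".toList.contains c = false) :
    compDict.get? (PySem.Chars.upperChar c) = none := by
  have hl : "ATGCatgc".toList = ['A','T','G','C','a','t','g','c'] := by decide
  rw [hl] at h
  simp only [List.contains_eq_mem, List.mem_cons, List.not_mem_nil, or_false,
    decide_eq_false_iff_not, not_or] at h
  obtain ⟨hA, hT, hG, hC, ha, ht, hg, hc⟩ := h
  have hkeys : compDict.keys = ['A', 'T', 'G', 'C'] := by decide
  rw [PySem.Dict.get?_eq_none_iff_not_mem_keys, hkeys]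
  unfold PySem.Chars.upperChar PySem.Chars.islower
  split
  · rename_i hlow
    simp only [Bool.and_eq_true, decide_eq_true_eq] at hlow
    have h1 : 97 ≤ c.toNat := hlow.1
    have h2 : c.toNat ≤ 122 := hlow.2
    have htn : (Char.ofNat (c.toNat - 32)).toNat = c.toNat - 32 :=
      toNat_ofNat_valid _ (by omega)
    have key : ∀ d : Char, Char.ofNat (c.toNat - 32) = d → c = Char.ofNat (d.toNat + 32) := by
      intro d he
      have h3 := congrArg Char.toNat he
      rw [htn] at h3
      rw [← Char.ofNat_toNat c, show c.toNat = d.toNat + 32 by omega]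
    simp only [List.mem_cons, List.not_mem_nil, or_false, not_or]
    refine ⟨fun he => ha ?_, fun he => ht ?_, fun he => hg ?_, fun he => hc ?_⟩
    · rw [key 'A' he]; decide
    · rw [key 'T' he]; decide
    · rw [key 'G' he]; decide
    · rw [key 'C' he]; decide
  · simp only [List.mem_cons, List.not_mem_nil, or_false, not_or]
    exact ⟨hA, hT, hG, hC⟩

-- pointwise: on characters of the input, B's translate step equals A's upper-then-lookup
theorem translate_step (s : List Char) (c : Char) (hc : c ∈ s) :
    (if (s.filter (fun c => !("ATGCatgc".toList.contains c))).contains c then none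
     else
       match transTable.get? c with
       | some v => some v
       | none => some c) = compDict.get? (PySem.Chars.upperChar c) := by
  by_cases hk : "ATGCatgc".toList.contains c = true
  · have hdel : ¬ ((s.filter (fun c => !("ATGCatgc".toList.contains c))).contains c = true) := by
      rw [List.contains_eq_mem, decide_eq_true_eq]
      intro hmem
      have hp := List.of_mem_filter hmem
      rw [hk] at hp
      exact absurd hp (by decide)
    rw [if_neg hdel]
    have hl : "ATGCatgc".toList = ['A','T','G','C','a','t','g','c'] := by decide
    rw [hl] at hk
    simp only [List.contains_eq_mem, List.mem_cons, List.not_mem_nil, or_false,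
      decide_eq_true_eq] at hk
    rcases hk with h | h | h | h | h | h | h | h <;> subst h <;> decide
  · have hk' : "ATGCatgc".toList.contains c = false := by
      simpa using hk
    have hdel : (s.filter (fun c => !("ATGCatgc".toList.contains c))).contains c = true := by
      rw [List.contains_eq_mem, decide_eq_true_eq]
      exact List.mem_filter.mpr ⟨hc, by rw [hk']; rfl⟩
    rw [if_pos hdel, get?_upper_of_not_keep c hk']

-- the two whole passes agree
theorem translate_eq (s : List Char) :
    translateB (s.filter (fun c => !("ATGCatgc".toList.contains c))) s =
      (s.map PySem.Chars.upperChar).filterMap (fun c => compDict.get? c) := by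
  rw [List.filterMap_map, translateB]
  exact List.filterMap_congr (fun c hc => translate_step s c hc)

-- ===== VERDICT (by name: the statement is the Claim_ definition above) =====
theorem compSeq_spec : Claim_equal_compSeq := by
  intro DNA_seq direction _
  unfold Spec_compSeq compSeq compSeq_alt
  by_cases h : direction == "reverse"
  · rw [if_pos h, if_pos h, PySem.Str.slice?_none_none_neg_one, PySem.Str.slice?_none_none_neg_one]
    simp only [Option.getD_some, foldl_compSeqStep, List.nil_append, String.toList_ofList,
      List.filterMap_reverse, translate_eq, PySem.Str.toList_upper, upper_eq_map]
  · rw [if_neg h, if_neg h, foldl_compSeqStep, List.nil_append, translate_eq,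
      PySem.Str.toList_upper, upper_eq_map]
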